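-- pv_equiv track=rewrite | github.com/eskutcheon/OnetabAutosorter | src/onetab_autosorter/utils/clean_utils.py | assign_line_bin
-- ===== SOURCE A (Python) =====
-- def assign_line_bin(line_idx: int, num_lines: int, num_bins: int = 5) -> int:
--     """ Assigns a line index to a bin based on the total number of lines and the specified number of bins. """
--     if num_bins <= 0:
--         raise ValueError("Number of bins must be greater than 0.")
--     # simple approach for creating unequal bins based on num_lines and num_bins
--     if num_lines == 0:
--         return 0
--     num_bins = min(num_lines, num_bins)  # ensure at least one line per bin (or num_lines >= num_bins)
--     bin_size = num_lines // num_bins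
--     for i in range(num_bins):
--         if line_idx < (i + 1) * bin_size:
--             return i
--     if num_lines % bin_size != 0:  # if there's a remainder, assign to the last bin
--         return num_bins - 1 # since it's the bin index starting at 0
-- ===== SOURCE B (Python) =====
-- def assign_line_bin(line_idx: int, num_lines: int, num_bins: int = 5) -> int:
--     """ Assigns a line index to a bin: O(1) clamped division instead of a linear scan. """
--     if num_bins <= 0:
--         raise ValueError("Number of bins must be greater than 0.")
--     if num_lines == 0:
--         return 0
--     num_bins = min(num_lines, num_bins)
--     bin_size = num_lines // num_bins
--     return max(0, min(line_idx // bin_size, num_bins - 1))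
-- ===== Notes on version B (the rewrite author's own statement) =====
-- stated objective: simpler
-- what changed: Replaces A's linear scan over the bins with a single clamped integer division max(0, min(line_idx//bin_size, num_bins-1)).
-- outside the precondition, e.g. on assign_line_bin(6, 6, 3): A returns None, B returns 2; on assign_line_bin(0, -3, 2): A returns None, B returns 0
import Mathlib
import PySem

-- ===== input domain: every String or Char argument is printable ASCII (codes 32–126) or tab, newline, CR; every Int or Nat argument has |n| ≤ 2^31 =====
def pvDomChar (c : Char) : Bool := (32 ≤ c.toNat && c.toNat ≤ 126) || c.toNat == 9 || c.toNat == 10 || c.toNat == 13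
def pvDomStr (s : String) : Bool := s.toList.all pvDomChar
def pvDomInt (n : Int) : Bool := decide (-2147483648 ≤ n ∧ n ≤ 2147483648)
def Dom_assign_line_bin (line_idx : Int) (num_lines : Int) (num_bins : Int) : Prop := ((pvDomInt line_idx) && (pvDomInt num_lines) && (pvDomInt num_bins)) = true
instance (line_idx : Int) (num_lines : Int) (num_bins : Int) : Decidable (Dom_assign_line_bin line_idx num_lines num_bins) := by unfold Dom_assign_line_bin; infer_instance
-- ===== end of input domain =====

-- B replaces A's linear scan over the bins with one clamped integer division (objective: simpler).

-- ===== PORT A =====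
-- 'for i in range(num_bins): if line_idx < (i+1)*bin_size: return i' — loop counter i, fuel = number of remaining iterations
def albLoopA (line_idx : Int) (bin_size : Int) (i : Int) : Nat → Option Int
  | 0 => none
  | fuel + 1 =>
    if line_idx < (i + 1) * bin_size then some i
    else albLoopA line_idx bin_size (i + 1) fuel

def assign_line_bin (line_idx : Int) (num_lines : Int) (num_bins : Int) : Int :=
  if num_bins ≤ 0 then 0  -- Python raises ValueError here; excluded by Pre_
  else if num_lines = 0 then 0
  else
    let nb := min num_lines num_bins
    let bs := PySem.Int.floordiv num_lines nb
    match albLoopA line_idx bs 0 nb.toNat with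
    | some i => i
    | none =>
      if PySem.Int.mod num_lines bs ≠ 0 then nb - 1
      else 0  -- Python falls through and returns None (not an int) here; excluded by Pre_

-- ===== PORT B =====
def assign_line_bin_alt (line_idx : Int) (num_lines : Int) (num_bins : Int) : Int :=
  if num_bins ≤ 0 then 0  -- Python raises ValueError here; excluded by Pre_
  else if num_lines = 0 then 0
  else
    let nb := min num_lines num_bins
    let bs := PySem.Int.floordiv num_lines nb
    max 0 (min (PySem.Int.floordiv line_idx bs) (nb - 1))

-- ===== PRECONDITION & SPEC =====
-- Pre_ excludes (a) num_bins ≤ 0, where A raises ValueError, and (b) the inputs on which A's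
-- loop and remainder test both fail so A falls through returning None (not an int):
-- num_lines < 0, or num_lines > 0 with line_idx ≥ num_bins*bin_size and num_lines % bin_size == 0.
def Pre_assign_line_bin (line_idx : Int) (num_lines : Int) (num_bins : Int) : Prop :=
  0 < num_bins ∧
    (num_lines = 0 ∨
      (0 < num_lines ∧
        (line_idx < (min num_lines num_bins) * PySem.Int.floordiv num_lines (min num_lines num_bins) ∨
          PySem.Int.mod num_lines (PySem.Int.floordiv num_lines (min num_lines num_bins)) ≠ 0)))
instance (line_idx : Int) (num_lines : Int) (num_bins : Int) : Decidable (Pre_assign_line_bin line_idx num_lines num_bins) := by unfold Pre_assign_line_bin; infer_instance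

def pvWitness_assign_line_bin : Int × Int × Int := (3, 7, 3)

def Spec_assign_line_bin (line_idx : Int) (num_lines : Int) (num_bins : Int) (out : Int) : Prop := out = assign_line_bin_alt line_idx num_lines num_bins
instance (line_idx : Int) (num_lines : Int) (num_bins : Int) (out : Int) : Decidable (Spec_assign_line_bin line_idx num_lines num_bins out) := by unfold Spec_assign_line_bin; infer_instance

-- ===== CLAIM (what is proved, stated in full; the proofs are below) =====
def Claim_equal_assign_line_bin : Prop := ∀ (line_idx : Int) (num_lines : Int) (num_bins : Int), Dom_assign_line_bin line_idx num_lines num_bins → Pre_assign_line_bin line_idx num_lines num_bins → Spec_assign_line_bin line_idx num_lines num_bins (assign_line_bin line_idx num_lines num_bins)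

-- ===== LEMMAS AND PROOFS =====


-- Characterisation of A's loop: with positive bin size it returns the clamped quotient
-- iff line_idx falls below the scanned range's upper bound, else none.
theorem albLoopA_eq (line_idx bs : Int) (hbs : 0 < bs) :
    ∀ (fuel : Nat) (i : Int),
      albLoopA line_idx bs i fuel =
        if line_idx < (i + fuel) * bs then
          (if fuel = 0 then none else some (max i (PySem.Int.floordiv line_idx bs)))
        else none := by
  intro fuel
  induction fuel with
  | zero => intro i; simp [albLoopA]
  | succ f ih =>
    intro i
    have hfc : (0:Int) ≤ (f : Int) := Int.natCast_nonneg f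
    rw [albLoopA]
    by_cases h : line_idx < (i + 1) * bs
    · have hq : PySem.Int.floordiv line_idx bs < i + 1 := by
        rw [PySem.Int.floordiv_lt_iff_lt_mul hbs]; exact h
      have hcov : line_idx < (i + ((f:Int) + 1)) * bs := by
        have hle : (i + 1) * bs ≤ (i + ((f:Int) + 1)) * bs :=
          mul_le_mul_of_nonneg_right (by omega) (le_of_lt hbs)
        omega
      simp [h, hcov, max_eq_left (by omega : PySem.Int.floordiv line_idx bs ≤ i)]
    · have hq : i + 1 ≤ PySem.Int.floordiv line_idx bs := by
        rw [PySem.Int.le_floordiv_iff_mul_le hbs]; omega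
      rw [ih (i + 1)]
      have harg : (i + 1 + (f:Int)) * bs = (i + ((f + 1 : Nat) : Int)) * bs := by push_cast; ring
      rw [harg]
      by_cases h2 : line_idx < (i + ((f:Int) + 1)) * bs
      · have hf : f ≠ 0 := by
          rcases Nat.eq_zero_or_pos f with hf0 | _
          · subst hf0; simp at h2; omega
          · omega
        simp [h, h2, hf, max_eq_right (by omega : i ≤ PySem.Int.floordiv line_idx bs),
          max_eq_right (by omega : i + 1 ≤ PySem.Int.floordiv line_idx bs)]
      · simp [h, h2]

-- ===== VERDICT (by name: the statement is the Claim_ definition above) =====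
theorem assign_line_bin_spec : Claim_equal_assign_line_bin := by
  intro l n b _ hpre
  obtain ⟨hb, hn⟩ := hpre
  unfold Spec_assign_line_bin assign_line_bin assign_line_bin_alt
  rcases hn with hn0 | ⟨hn, htail⟩
  · simp [hn0, not_le.mpr hb]
  · have hb' : ¬ b ≤ 0 := not_le.mpr hb
    have hn0 : n ≠ 0 := by omega
    simp only [if_neg hb', if_neg hn0]
    set nb := min n b with hnb
    have hnb1 : 1 ≤ nb := by rw [hnb]; omega
    have hnble : nb ≤ n := by rw [hnb]; omega
    set bs := PySem.Int.floordiv n nb with hbs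
    have hbs1 : 1 ≤ bs := by
      rw [hbs, PySem.Int.le_floordiv_iff_mul_le (by omega : (0:Int) < nb)]; omega
    have hbspos : (0:Int) < bs := by omega
    have hcast : ((nb.toNat : Int)) = nb := Int.toNat_of_nonneg (by omega)
    rw [albLoopA_eq l bs hbspos nb.toNat 0, hcast, zero_add]
    by_cases hcov : l < nb * bs
    · have hfz : nb.toNat ≠ 0 := by omega
      have hqlt : PySem.Int.floordiv l bs < nb := by
        rw [PySem.Int.floordiv_lt_iff_lt_mul hbspos]; exact hcov
      simp only [if_pos hcov, if_neg hfz]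
      rw [min_eq_left (by omega : PySem.Int.floordiv l bs ≤ nb - 1)]
    · have hrem : PySem.Int.mod n bs ≠ 0 := by
        rcases htail with hlt | hm
        · exact absurd hlt hcov
        · exact hm
      have hqge : nb ≤ PySem.Int.floordiv l bs := by
        rw [PySem.Int.le_floordiv_iff_mul_le hbspos]; omega
      simp only [if_neg hcov, if_pos hrem]
      rw [min_eq_right (by omega : nb - 1 ≤ PySem.Int.floordiv l bs),
        max_eq_right (by omega : (0:Int) ≤ nb - 1)]
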